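-- pv_equiv track=rewrite | github.com/robotique-sainteanne/defiprog | 2024/comp/block-a/twoD1.py | solve
-- ===== SOURCE A (Python) =====
-- def solve(n):
--     fullLength = n*2+1
--     totalLength = n*2-1
--     currentLineArray = []
--     previousLine = ""
--     for i in range(fullLength):
--         currentLine = ""
--         if i<n:
--             amountOfDashes = (n-i)*2-1
--         elif i == n:
--             amountOfDashes = 0
--         else:
--             amountOfDashes = (i-n)*2-1
--
--         amountOfStraights = totalLength-amountOfDashes
--         if i == n:
--             amountOfStraights = n*2
--
--
--
--         currentLine = ""
--         for j in range(int(amountOfStraights/2)):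
--             currentLine = currentLine+"│"
--
--         if i<n:
--             currentLine = currentLine+"┌"
--         elif i == n:
--             currentLine = currentLine+" "
--         else:
--             currentLine = currentLine+"└"
--
--         for j in range(amountOfDashes):
--             currentLine = currentLine+"─"
--
--         if i<n:
--             currentLine = currentLine+"┐"
--         elif i == n:
--             currentLine = currentLine
--         else:
--             currentLine = currentLine+"┘"
--
--         for j in range(int(amountOfStraights/2)):
--             currentLine = currentLine+"│"
--
--         currentLineArray.append(currentLine)
--
--     return currentLineArray
-- ===== SOURCE B (Python) =====
-- def solve(n):
--     if n < 0:
--         return []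
--     top = ["│" * i + "┌" + "─" * ((n - i) * 2 - 1) + "┐" + "│" * i
--            for i in range(n)]
--     middle = "│" * n + " " + "│" * n
--     flip = {"┌": "└", "┐": "┘"}
--     bottom = ["".join(flip.get(ch, ch) for ch in row) for row in reversed(top)]
--     return top + [middle] + bottom
-- ===== Notes on version B (the rewrite author's own statement) =====
-- stated objective: simpler
-- what changed: B replaces A's single loop over all 2n+1 rows with per-row branching, dash/vertical count arithmetic and character-by-character string accumulation by a closed-form comprehension for the top half rows via string repetition, an explicit middle row, and the bottom half obtained by mirroring the top half and flipping the corner characters.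
import Mathlib
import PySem

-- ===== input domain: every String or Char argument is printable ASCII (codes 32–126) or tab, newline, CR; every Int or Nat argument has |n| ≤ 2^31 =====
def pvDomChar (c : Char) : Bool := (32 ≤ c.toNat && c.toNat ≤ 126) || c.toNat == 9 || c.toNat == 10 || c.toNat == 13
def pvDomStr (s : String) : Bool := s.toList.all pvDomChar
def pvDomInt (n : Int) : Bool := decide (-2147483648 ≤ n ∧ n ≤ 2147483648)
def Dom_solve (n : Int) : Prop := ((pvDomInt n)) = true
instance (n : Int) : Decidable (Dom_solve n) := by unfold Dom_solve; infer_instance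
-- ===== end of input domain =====

-- B builds the figure from closed-form rows plus mirror symmetry instead of A's
-- per-character accumulation loops with per-row dash/vertical arithmetic (objective: simpler).

-- ===== PORT A =====
-- one iteration of A's loop: the line built for row index i
def solveRow (n i : Int) : List Char :=
  let totalLength := n*2-1
  let amountOfDashes : Int :=
    if i < n then (n-i)*2-1 else if i = n then 0 else (i-n)*2-1
  let amountOfStraights : Int := if i = n then n*2 else totalLength - amountOfDashes
  -- int(amountOfStraights/2): amountOfStraights is even and nonnegative in the loop,
  -- so Python's float division + int() truncation is exact integer halving (tdiv)
  let half := amountOfStraights.tdiv 2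
  let line1 := (PySem.List.pyRange 0 half 1).foldl (fun acc _ => acc ++ ['│']) []
  let line2 := if i < n then line1 ++ ['┌'] else if i = n then line1 ++ [' '] else line1 ++ ['└']
  let line3 := (PySem.List.pyRange 0 amountOfDashes 1).foldl (fun acc _ => acc ++ ['─']) line2
  let line4 := if i < n then line3 ++ ['┐'] else if i = n then line3 else line3 ++ ['┘']
  (PySem.List.pyRange 0 half 1).foldl (fun acc _ => acc ++ ['│']) line4

def solve (n : Int) : List String :=
  (PySem.List.pyRange 0 (n*2+1) 1).foldl
    (fun acc i => acc ++ [String.ofList (solveRow n i)]) []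

-- ===== PORT B =====
-- flip.get(ch, ch) of Source B
def flipChar (c : Char) : Char := if c = '┌' then '└' else if c = '┐' then '┘' else c

def solve_alt (n : Int) : List String :=
  if n < 0 then []
  else
    let top := (PySem.List.pyRange 0 n 1).map (fun i =>
      String.ofList (PySem.List.pyRepeat ['│'] i ++ ['┌'] ++ PySem.List.pyRepeat ['─'] ((n-i)*2-1)
        ++ ['┐'] ++ PySem.List.pyRepeat ['│'] i))
    let middle := String.ofList (PySem.List.pyRepeat ['│'] n ++ [' '] ++ PySem.List.pyRepeat ['│'] n)
    let bottom := top.reverse.map (fun row => String.ofList (row.toList.map flipChar))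
    top ++ [middle] ++ bottom

-- ===== PRECONDITION & SPEC =====
def Spec_solve (n : Int) (out : List String) : Prop := out = solve_alt n
instance (n : Int) (out : List String) : Decidable (Spec_solve n out) := by unfold Spec_solve; infer_instance

-- ===== CLAIM (what is proved, stated in full; the proofs are below) =====
def Claim_equal_solve : Prop := ∀ (n : Int), Dom_solve n → Spec_solve n (solve n)

-- ===== LEMMAS AND PROOFS =====

-- appending one fixed char per loop iteration = appending a replicate
theorem foldl_app_const {α : Type} (l : List α) (c : Char) (acc : List Char) :
    l.foldl (fun a _ => a ++ [c]) acc = acc ++ List.replicate l.length c := by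
  induction l generalizing acc with
  | nil => simp
  | cons x xs ih => simp [List.foldl_cons, ih, List.replicate_succ]

theorem foldl_app_map (l : List Int) (f : Int → String) :
    l.foldl (fun a i => a ++ [f i]) [] = l.map f := by
  have h : ∀ (l : List Int) (acc : List String),
      l.foldl (fun a i => a ++ [f i]) acc = acc ++ l.map f := by
    intro l; induction l with
    | nil => simp
    | cons x xs ih => intro acc; simp [List.foldl_cons, ih]
  simpa using h l []

theorem solve_as_map (n : Int) :
    solve n = (PySem.List.pyRange 0 (n*2+1) 1).map (fun i => String.ofList (solveRow n i)) := by
  simp only [solve]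
  exact foldl_app_map _ _

theorem solveRow_top (n i : Int) (_h0 : 0 ≤ i) (h : i < n) :
    solveRow n i = List.replicate i.toNat '│' ++ ['┌'] ++ List.replicate ((n-i)*2-1).toNat '─'
      ++ ['┐'] ++ List.replicate i.toNat '│' := by
  have hne : ¬ i = n := by omega
  have hh : (n*2-1) - ((n-i)*2-1) = 2*i := by ring
  simp only [solveRow, if_pos h, if_neg hne, hh,
    Int.mul_tdiv_cancel_left i (by norm_num : (2:Int) ≠ 0),
    foldl_app_const, PySem.List.length_pyRange_one]
  simp [List.append_assoc]

theorem solveRow_mid (n : Int) :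
    solveRow n n = List.replicate n.toNat '│' ++ [' '] ++ List.replicate n.toNat '│' := by
  have hh : n*2 = 2*n := by ring
  simp only [solveRow, lt_irrefl, if_false, hh,
    foldl_app_const, PySem.List.length_pyRange_one]
  simp [List.append_assoc]

theorem solveRow_bot (n i : Int) (h : n < i) :
    solveRow n i = List.replicate (2*n-i).toNat '│' ++ ['└'] ++ List.replicate ((i-n)*2-1).toNat '─'
      ++ ['┘'] ++ List.replicate (2*n-i).toNat '│' := by
  have hlt : ¬ i < n := by omega
  have hne : ¬ i = n := by omega
  have hh : (n*2-1) - ((i-n)*2-1) = 2*(2*n-i) := by ring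
  simp only [solveRow, if_neg hlt, if_neg hne, hh,
    Int.mul_tdiv_cancel_left (2*n-i) (by norm_num : (2:Int) ≠ 0),
    foldl_app_const, PySem.List.length_pyRange_one]
  simp [List.append_assoc]

theorem part1 (n : Int) :
    (PySem.List.pyRange 0 n 1).map (fun i => String.ofList (solveRow n i)) =
    (PySem.List.pyRange 0 n 1).map (fun i =>
      String.ofList (PySem.List.pyRepeat ['│'] i ++ ['┌'] ++ PySem.List.pyRepeat ['─'] ((n-i)*2-1)
        ++ ['┐'] ++ PySem.List.pyRepeat ['│'] i)) := by
  apply List.map_congr_left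
  intro i hi
  rw [PySem.List.mem_pyRange_one] at hi
  rw [solveRow_top n i hi.1 hi.2]
  simp [PySem.List.pyRepeat_singleton]

theorem part3 (n : Int) (hn : 0 ≤ n) :
    (PySem.List.pyRange (n+1) (n*2+1) 1).map (fun i => String.ofList (solveRow n i)) =
    ((PySem.List.pyRange 0 n 1).map (fun i =>
      String.ofList (PySem.List.pyRepeat ['│'] i ++ ['┌'] ++ PySem.List.pyRepeat ['─'] ((n-i)*2-1)
        ++ ['┐'] ++ PySem.List.pyRepeat ['│'] i))).reverse.map
      (fun row => String.ofList (row.toList.map flipChar)) := by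
  apply List.ext_getElem
  · simp [PySem.List.length_pyRange_one]; omega
  · intro k h1 h2
    simp only [List.getElem_map, List.getElem_reverse, List.length_map,
      PySem.List.length_pyRange_one, PySem.List.getElem_pyRange_one]
    simp only [List.length_map, PySem.List.length_pyRange_one] at h1 h2
    rw [solveRow_bot n _ (by omega)]
    have hj : (0:Int) + ↑((n - 0).toNat - 1 - k) = n - 1 - ↑k := by omega
    rw [hj]
    have f1 : flipChar '│' = '│' := rfl
    have f2 : flipChar '┌' = '└' := rfl
    have f3 : flipChar '─' = '─' := rfl
    have f4 : flipChar '┐' = '┘' := rfl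
    simp only [PySem.List.pyRepeat_singleton, String.toList_ofList, List.map_append,
      List.map_replicate, f1, f2, f3, f4, List.map_cons, List.map_nil]
    have e1 : (2*n - (n+1+↑k)).toNat = (n-1-↑k).toNat := by omega
    have e2 : ((n+1+↑k-n)*2-1).toNat = ((n-(n-1-↑k))*2-1).toNat := by omega
    rw [e1, e2]

theorem main_pos (n : Int) (hn : 0 ≤ n) : solve n = solve_alt n := by
  rw [solve_as_map]
  simp only [solve_alt, if_neg (by omega : ¬ n < 0)]
  rw [PySem.List.pyRange_one_append 0 n (n*2+1) hn (by omega),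
      PySem.List.pyRange_one_append n (n+1) (n*2+1) (by omega) (by omega),
      PySem.List.pyRange_one_singleton]
  simp only [List.map_append, List.map_cons, List.map_nil]
  rw [part1 n, part3 n hn, solveRow_mid n]
  simp [PySem.List.pyRepeat_singleton]

-- ===== VERDICT (by name: the statement is the Claim_ definition above) =====
theorem solve_spec : Claim_equal_solve := by
  intro n _
  unfold Spec_solve
  by_cases hn : n < 0
  · rw [solve_as_map, PySem.List.pyRange_one_eq_nil (by omega)]
    simp [solve_alt, if_pos hn]
  · exact main_pos n (by omega)
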